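-- pv_equiv track=rewrite | github.com/otizonaizit/2024-ims | hpp/benchmark_python/bench_plot.py | get_xlabels
-- ===== SOURCE A (Python) =====
-- def get_xlabels(x):
--     xlabels = []
--     for value in x:
--         b = int(2**value)
--         if b < 1024:
--             xlabels.append(f'{b}B')
--         elif b < 1048576:
--             xlabels.append(f'{b//1024}K')
--         elif b < 1073741824:
--             xlabels.append(f'{b//1024//1024}M')
--         else:
--             xlabels.append(f'{b//1024//1024//1024}G')
--     return xlabels
-- ===== SOURCE B (Python) =====
-- def get_xlabels(x):
--     xlabels = []
--     for value in x:
--         b = int(2**value)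
--         i = 0
--         while b >= 1024 and i < 3:
--             b //= 1024
--             i += 1
--         xlabels.append(f'{b}{"BKMG"[i]}')
--     return xlabels
-- ===== Notes on version B (the rewrite author's own statement) =====
-- stated objective: simpler
-- what changed: Replaces the four-way threshold cascade with a while loop that repeatedly floor-divides by 1024 (capped at 3 steps) while counting the magnitude index into the suffix string 'BKMG'.
import Mathlib
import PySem

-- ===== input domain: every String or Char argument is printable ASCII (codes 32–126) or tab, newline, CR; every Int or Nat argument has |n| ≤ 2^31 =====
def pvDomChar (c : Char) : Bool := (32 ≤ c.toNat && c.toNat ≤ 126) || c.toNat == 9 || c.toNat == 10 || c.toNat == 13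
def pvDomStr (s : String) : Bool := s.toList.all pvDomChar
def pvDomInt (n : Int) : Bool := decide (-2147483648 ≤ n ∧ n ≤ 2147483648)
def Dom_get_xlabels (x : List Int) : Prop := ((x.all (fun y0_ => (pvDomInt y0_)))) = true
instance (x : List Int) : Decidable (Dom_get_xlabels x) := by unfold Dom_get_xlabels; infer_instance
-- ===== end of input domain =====

-- B replaces A's four-way threshold cascade by a while loop that repeatedly floor-divides by
-- 1024 (at most 3 times) while counting the magnitude step; objective: simpler.

-- ===== PORT A =====
-- int(2**value): for value < 0 Python yields a float < 1, truncated to 0 by int().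
def get_xlabels (x : List Int) : List String :=
  x.foldl (fun xlabels value =>
    let b : Int := if 0 ≤ value then 2 ^ value.toNat else 0
    if b < 1024 then xlabels ++ [PySem.Int.toStr b ++ "B"]
    else if b < 1048576 then xlabels ++ [PySem.Int.toStr (PySem.Int.floordiv b 1024) ++ "K"]
    else if b < 1073741824 then
      xlabels ++ [PySem.Int.toStr (PySem.Int.floordiv (PySem.Int.floordiv b 1024) 1024) ++ "M"]
    else
      xlabels ++ [PySem.Int.toStr (PySem.Int.floordiv (PySem.Int.floordiv (PySem.Int.floordiv b 1024) 1024) 1024) ++ "G"]) []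

-- ===== PORT B =====
-- the while loop of Source B: 'while b >= 1024 and i < 3: b //= 1024; i += 1'
def pvShrink (b : Int) (i : Int) : Int × Int :=
  if 1024 ≤ b ∧ i < 3 then pvShrink (PySem.Int.floordiv b 1024) (i + 1) else (b, i)
termination_by (3 - i).toNat
decreasing_by omega

def get_xlabels_alt (x : List Int) : List String :=
  x.foldl (fun xlabels value =>
    let b : Int := if 0 ≤ value then 2 ^ value.toNat else 0
    let p := pvShrink b 0
    -- '"BKMG"[i]': i is always 0..3 here so the indexing is exact; getD 'B' is never the default
    xlabels ++ [PySem.Int.toStr p.1 ++ String.ofList [(PySem.Str.pyGet? "BKMG" p.2).getD 'B']]) []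

-- ===== PRECONDITION & SPEC =====
def Spec_get_xlabels (x : List Int) (out : List String) : Prop := out = get_xlabels_alt x
instance (x : List Int) (out : List String) : Decidable (Spec_get_xlabels x out) := by unfold Spec_get_xlabels; infer_instance

-- ===== CLAIM (what is proved, stated in full; the proofs are below) =====
def Claim_equal_get_xlabels : Prop := ∀ (x : List Int), Dom_get_xlabels x → Spec_get_xlabels x (get_xlabels x)

-- ===== LEMMAS AND PROOFS =====

theorem pvShrink_stop (b : Int) (i : Int) (h : ¬ (1024 ≤ b ∧ i < 3)) :
    pvShrink b i = (b, i) := by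
  rw [pvShrink]; simp [h]

theorem pvShrink_step (b : Int) (i : Int) (h : 1024 ≤ b ∧ i < 3) :
    pvShrink b i = pvShrink (PySem.Int.floordiv b 1024) (i + 1) := by
  rw [pvShrink]; simp [h]

theorem fd1024 (b : Int) : PySem.Int.floordiv b 1024 = b / 1024 :=
  PySem.Int.floordiv_eq_ediv_of_pos (by norm_num)

-- one step of A's fold equals one step of B's fold, for any b ≥ 0
theorem step_eq (b : Int) (hb : 0 ≤ b) (acc : List String) :
    (if b < 1024 then acc ++ [PySem.Int.toStr b ++ "B"]
     else if b < 1048576 then acc ++ [PySem.Int.toStr (PySem.Int.floordiv b 1024) ++ "K"]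
     else if b < 1073741824 then
       acc ++ [PySem.Int.toStr (PySem.Int.floordiv (PySem.Int.floordiv b 1024) 1024) ++ "M"]
     else
       acc ++ [PySem.Int.toStr (PySem.Int.floordiv (PySem.Int.floordiv (PySem.Int.floordiv b 1024) 1024) 1024) ++ "G"])
    = acc ++ [PySem.Int.toStr (pvShrink b 0).1 ++ String.ofList [(PySem.Str.pyGet? "BKMG" (pvShrink b 0).2).getD 'B']] := by
  by_cases h1 : b < 1024
  · have e : pvShrink b 0 = (b, 0) := pvShrink_stop b 0 (by omega)
    rw [e]
    have hs : String.ofList [(PySem.Str.pyGet? "BKMG" (0:Int)).getD 'B'] = "B" := by decide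
    simp [h1, hs]
  · by_cases h2 : b < 1048576
    · have e : pvShrink b 0 = (PySem.Int.floordiv b 1024, 1) := by
        rw [pvShrink_step b 0 ⟨by omega, by norm_num⟩,
            pvShrink_stop (PySem.Int.floordiv b 1024) (0 + 1) (by rw [fd1024]; omega)]
        norm_num
      rw [e]
      have hs : String.ofList [(PySem.Str.pyGet? "BKMG" (1:Int)).getD 'B'] = "K" := by decide
      simp [h1, h2, hs]
    · by_cases h3 : b < 1073741824
      · have e : pvShrink b 0 = (PySem.Int.floordiv (PySem.Int.floordiv b 1024) 1024, 2) := by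
          rw [pvShrink_step b 0 ⟨by omega, by norm_num⟩,
              pvShrink_step (PySem.Int.floordiv b 1024) (0 + 1) ⟨by rw [fd1024]; omega, by norm_num⟩,
              pvShrink_stop (PySem.Int.floordiv (PySem.Int.floordiv b 1024) 1024) (0 + 1 + 1)
                (by rw [fd1024, fd1024]; omega)]
          norm_num
        rw [e]
        have hs : String.ofList [(PySem.Str.pyGet? "BKMG" (2:Int)).getD 'B'] = "M" := by decide
        simp [h1, h2, h3, hs]
      · have e : pvShrink b 0
            = (PySem.Int.floordiv (PySem.Int.floordiv (PySem.Int.floordiv b 1024) 1024) 1024, 3) := by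
          rw [pvShrink_step b 0 ⟨by omega, by norm_num⟩,
              pvShrink_step (PySem.Int.floordiv b 1024) (0 + 1) ⟨by rw [fd1024]; omega, by norm_num⟩,
              pvShrink_step (PySem.Int.floordiv (PySem.Int.floordiv b 1024) 1024) (0 + 1 + 1)
                ⟨by rw [fd1024, fd1024]; omega, by norm_num⟩,
              pvShrink_stop (PySem.Int.floordiv (PySem.Int.floordiv (PySem.Int.floordiv b 1024) 1024) 1024)
                (0 + 1 + 1 + 1) (by omega)]
          norm_num
        rw [e]
        have hs : String.ofList [(PySem.Str.pyGet? "BKMG" (3:Int)).getD 'B'] = "G" := by decide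
        simp [h1, h2, h3, hs]

theorem foldl_eq (x : List Int) (acc : List String) :
    x.foldl (fun xlabels value =>
      let b : Int := if 0 ≤ value then 2 ^ value.toNat else 0
      if b < 1024 then xlabels ++ [PySem.Int.toStr b ++ "B"]
      else if b < 1048576 then xlabels ++ [PySem.Int.toStr (PySem.Int.floordiv b 1024) ++ "K"]
      else if b < 1073741824 then
        xlabels ++ [PySem.Int.toStr (PySem.Int.floordiv (PySem.Int.floordiv b 1024) 1024) ++ "M"]
      else
        xlabels ++ [PySem.Int.toStr (PySem.Int.floordiv (PySem.Int.floordiv (PySem.Int.floordiv b 1024) 1024) 1024) ++ "G"]) acc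
    = x.foldl (fun xlabels value =>
      let b : Int := if 0 ≤ value then 2 ^ value.toNat else 0
      let p := pvShrink b 0
      xlabels ++ [PySem.Int.toStr p.1 ++ String.ofList [(PySem.Str.pyGet? "BKMG" p.2).getD 'B']]) acc := by
  induction x generalizing acc with
  | nil => rfl
  | cons v t ih =>
    simp only [List.foldl]
    rw [step_eq (if 0 ≤ v then 2 ^ v.toNat else 0) (by positivity) acc]
    exact ih _

-- ===== VERDICT (by name: the statement is the Claim_ definition above) =====
theorem get_xlabels_spec : Claim_equal_get_xlabels := by
  intro x _
  unfold Spec_get_xlabels get_xlabels get_xlabels_alt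
  exact foldl_eq x []
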